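-- pv_equiv track=rewrite | github.com/mms212187/mms2187 | 4 работа.py | censure
-- ===== SOURCE A (Python) =====
-- def censure(text, censured_words):
--     new_text = text
--     for word in censured_words:
--         while word in new_text:
--             start_index = new_text.find(word)
--             end_index = start_index + len(word)
--             first_section = new_text[:start_index]
--             second_section = new_text[end_index:]
--             new_text = first_section + second_section
--     return new_text
-- ===== SOURCE B (Python) =====
-- def censure(text, censured_words):
--     # Stack-based single pass per word: push chars, pop a word-length
--     # suffix whenever the stack ends with the word (handles cascades).
--     # Words not present in the current text are skipped without a pass.
--     s = text
--     for w in censured_words: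
--         if w not in s:
--             continue
--         n = len(w)
--         wl = list(w)
--         stack = []
--         for ch in s:
--             stack.append(ch)
--             if stack[-n:] == wl:
--                 del stack[-n:]
--         s = ''.join(stack)
--     return s
-- ===== Notes on version B (the rewrite author's own statement) =====
-- stated objective: alternative
-- what changed: replaced the per-word 'while word in text: find and splice' loop (which rescans and rebuilds the shrinking string on every removal) by a single stack-based pass per word that pops a word-length suffix whenever the stack ends with the word, skipping words not present
-- outside the precondition, e.g. on censure('ab', ['']): A does not finish within the time limit, B returns 'ab'
import Mathlib
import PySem

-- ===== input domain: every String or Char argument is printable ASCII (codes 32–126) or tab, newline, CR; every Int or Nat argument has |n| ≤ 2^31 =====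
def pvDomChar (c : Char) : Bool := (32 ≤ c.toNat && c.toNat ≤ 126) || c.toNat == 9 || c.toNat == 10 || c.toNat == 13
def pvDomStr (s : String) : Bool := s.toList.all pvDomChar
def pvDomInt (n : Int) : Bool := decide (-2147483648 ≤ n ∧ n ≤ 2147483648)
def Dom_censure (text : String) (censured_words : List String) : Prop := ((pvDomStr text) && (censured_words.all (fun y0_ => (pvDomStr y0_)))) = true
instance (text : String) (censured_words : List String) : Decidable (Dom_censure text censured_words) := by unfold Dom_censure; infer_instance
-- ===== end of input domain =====

-- B replaces A's repeated find-and-splice while-loop by a stack-based single pass per word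
-- (pop a word-length suffix on match): a genuinely different algorithm of similar cost.
-- ===== PORT A =====
-- while word in new_text: find first occurrence, splice it out.  Fuel bounds the
-- while-loop (each iteration removes ≥ 1 char when word ≠ ""; for word = "" Python
-- diverges, which Pre_ excludes, so exhausting the fuel there claims nothing).
def censureLoopA (word : List Char) : Nat → List Char → List Char
  | 0, s => s
  | fuel + 1, s =>
    if PySem.Chars.isIn word s then
      let start_index := PySem.Chars.find s word
      let end_index := start_index + (word.length : Int)
      let first_section := PySem.Chars.slice s none (some start_index)
      let second_section := PySem.Chars.slice s (some end_index) none
      censureLoopA word fuel (first_section ++ second_section)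
    else s

def censure (text : String) (censured_words : List String) : String :=
  String.ofList (censured_words.foldl (fun s w => censureLoopA w.toList (s.length + 1) s) text.toList)

-- ===== PORT B =====
-- stack.append(ch); if stack[-n:] == wl: del stack[-n:]
def censureStepB (n : Int) (wl : List Char) (st : List Char) (ch : Char) : List Char :=
  let st' := st ++ [ch]
  if PySem.List.slice st' (some (-n)) none = wl then PySem.List.slice st' none (some (-n)) else st'

-- if w not in s: continue; else run the stack pass
def censure_alt (text : String) (censured_words : List String) : String :=
  String.ofList (censured_words.foldl
    (fun s w => if PySem.Chars.isIn w.toList s then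
        s.foldl (censureStepB (w.toList.length : Int) w.toList) []
      else s) text.toList)

-- ===== PRECONDITION & SPEC =====
-- Pre_ excludes an empty string among censured_words, on which A's while-loop never
-- terminates ('' is always found at index 0 and removing it changes nothing).
def Pre_censure (text : String) (censured_words : List String) : Prop := "" ∉ censured_words
instance (text : String) (censured_words : List String) : Decidable (Pre_censure text censured_words) := by unfold Pre_censure; infer_instance
def pvWitness_censure : String × List String := ("abcabba", ["ab", "b"])
def Spec_censure (text : String) (censured_words : List String) (out : String) : Prop := out = censure_alt text censured_words
instance (text : String) (censured_words : List String) (out : String) : Decidable (Spec_censure text censured_words out) := by unfold Spec_censure; infer_instance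

-- ===== CLAIM (what is proved, stated in full; the proofs are below) =====
def Claim_equal_censure : Prop := ∀ (text : String) (censured_words : List String), Dom_censure text censured_words → Pre_censure text censured_words → Spec_censure text censured_words (censure text censured_words)

-- ===== LEMMAS AND PROOFS =====

-- the pop condition fires exactly when the stack ends with the word
theorem stepB_cond_iff (w st' : List Char) (hw : w ≠ []) :
    PySem.List.slice st' (some (-(w.length : Int))) none = w ↔ w <:+ st' := by
  rw [PySem.List.slice_from_neg_natCast st' w.length (List.length_pos_iff.mpr hw)]
  exact ⟨fun h => List.suffix_iff_eq_drop.mpr h.symm, fun h => (List.suffix_iff_eq_drop.mp h).symm⟩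

-- no-pop run: if no prefix of p ends with w, the stack just accumulates p on top of nothing
theorem foldB_no_pop (w p : List Char) (hw : w ≠ [])
    (h : ∀ k, k ≤ p.length → ¬ w <:+ p.take k) :
    p.foldl (censureStepB (w.length : Int) w) [] = p := by
  induction p using List.reverseRecOn with
  | nil => rfl
  | append_singleton q c ih =>
    rw [List.foldl_append, ih (fun k hk => by
      rw [← List.take_append_of_le_length hk (l₂ := [c])]
      exact h k (by simp; omega))]
    simp only [censureStepB, List.foldl_cons, List.foldl_nil]
    rw [if_neg]
    intro hc
    exact h (q ++ [c]).length le_rfl (by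
      rw [List.take_length]
      exact (stepB_cond_iff w (q ++ [c]) hw).mp hc)

-- pop run: if p = u ++ w and no proper prefix of p ends with w, the run over p leaves u
theorem foldB_pop (w u : List Char) (hw : w ≠ [])
    (h : ∀ k, k < (u ++ w).length → ¬ w <:+ (u ++ w).take k) :
    (u ++ w).foldl (censureStepB (w.length : Int) w) [] = u := by
  obtain ⟨w', c, hc⟩ : ∃ w' c, w = w' ++ [c] := by
    rcases List.eq_nil_or_concat w with h0 | ⟨w', c, hc⟩
    · exact absurd h0 hw
    · exact ⟨w', c, by rw [hc, List.concat_eq_append]⟩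
  subst hc
  rw [show u ++ (w' ++ [c]) = (u ++ w') ++ [c] by simp]
  rw [List.foldl_append]
  rw [foldB_no_pop _ (u ++ w') hw (fun k hk => by
    rw [← List.take_append_of_le_length hk (l₂ := [c])]
    have := h k (by simp at hk ⊢; omega)
    simpa [List.append_assoc] using this)]
  simp only [censureStepB, List.foldl_cons, List.foldl_nil]
  rw [if_pos, PySem.List.slice_to_neg_natCast _ _ (by simp)]
  · rw [show (u ++ w') ++ [c] = u ++ (w' ++ [c]) by simp]
    simp
  · exact (stepB_cond_iff (w' ++ [c]) ((u ++ w') ++ [c]) hw).mpr ⟨u, by simp⟩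

theorem loopA_eq_foldB (w : List Char) (hw : w ≠ []) :
    ∀ fuel s, s.length < fuel →
    censureLoopA w fuel s = s.foldl (censureStepB (w.length : Int) w) [] := by
  intro fuel
  induction fuel with
  | zero => intro s hs; omega
  | succ f ih =>
    intro s hs
    by_cases hin : PySem.Chars.isIn w s = true
    · -- an occurrence exists: A removes the first one and loops
      have hinf : w <:+: s := (PySem.Chars.isIn_iff_infix w s).mp hin
      have hf0 : 0 ≤ PySem.Chars.find s w := (PySem.Chars.find_nonneg_iff s w).mpr hinf
      obtain ⟨hpre, hmin⟩ := PySem.Chars.find_spec hf0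
      set i := (PySem.Chars.find s w).toNat with hi
      set n := w.length with hn
      have hn1 : 1 ≤ n := List.length_pos_iff.mpr hw
      have hile : (PySem.Chars.find s w) ≤ s.length := PySem.Chars.find_le_length s w
      have hlen : i + n ≤ s.length := by
        have := hpre.length_le
        simp only [List.length_drop] at this
        omega
      -- decomposition: s.take (i+n) = s.take i ++ w
      have hp : s.take (i + n) = s.take i ++ w := by
        rw [List.take_add]
        congr 1
        obtain ⟨t, ht⟩ := hpre
        rw [← ht, List.take_left']
        rfl
      -- no prefix of s shorter than i+n ends with w
      have hns : ∀ k, k ≤ s.length → k < i + n → ¬ w <:+ s.take k := by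
        intro k hk1 hk2 hsuf
        obtain ⟨pre, hpe⟩ := hsuf
        have hlk : pre.length + n = k := by
          have := congrArg List.length hpe
          simp only [List.length_append, List.length_take] at this
          omega
        have h2 : w <+: s.drop pre.length := by
          refine ⟨s.drop k, ?_⟩
          calc w ++ s.drop k = (pre ++ (w ++ s.drop k)).drop pre.length :=
                List.drop_left.symm
            _ = s.drop pre.length := by rw [← List.append_assoc, hpe, List.take_append_drop]
        exact hmin pre.length (by omega) h2
      -- step A
      have hA : censureLoopA w (f + 1) s
          = censureLoopA w f (s.take i ++ s.drop (i + n)) := by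
        simp only [censureLoopA, hin, if_pos]
        congr 1
        rw [PySem.Chars.slice_eq_listSlice, PySem.Chars.slice_eq_listSlice,
            PySem.List.slice_to _ hf0, PySem.List.slice_from _ (by omega)]
        congr 2
        omega
      rw [hA, ih _ (by simp only [List.length_append, List.length_take, List.length_drop]; omega)]
      rw [List.foldl_append]
      -- left run over s.take i does not pop
      rw [foldB_no_pop w (s.take i) hw (fun k hk hsuf => by
        have hki : k ≤ i := by simp only [List.length_take] at hk; omega
        rw [List.take_take, min_eq_left hki] at hsuf
        exact hns k (by omega) (by omega) hsuf)]
      -- right-hand side: split s at i+n, run the first part with one pop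
      conv_rhs => rw [← List.take_append_drop (i + n) s, List.foldl_append]
      rw [hp, foldB_pop w (s.take i) hw (fun k hk hsuf => by
        rw [← hp, List.take_take] at hsuf
        have hl : (s.take i ++ w).length = i + n := by
          simp only [List.length_append, List.length_take]
          omega
        rw [hl] at hk
        rw [min_eq_left (by omega)] at hsuf
        exact hns k (by omega) hk hsuf)]
    · -- no occurrence: A returns s, B's stack never pops
      have hA : censureLoopA w (f + 1) s = s := by
        simp only [censureLoopA, hin]
        simp
      rw [hA]
      refine (foldB_no_pop w s hw (fun k hk hsuf => ?_)).symm
      have : w <:+: s := hsuf.isInfix.trans (List.take_prefix k s).isInfix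
      rw [← PySem.Chars.isIn_iff_infix w s] at this
      exact hin this


theorem outer_fold_eq (cs : List String) :
    ∀ l : List Char, (∀ w ∈ cs, w ≠ "") →
    cs.foldl (fun s w => censureLoopA w.toList (s.length + 1) s) l
      = cs.foldl (fun s w => if PySem.Chars.isIn w.toList s then
          s.foldl (censureStepB (w.toList.length : Int) w.toList) []
        else s) l := by
  induction cs with
  | nil => intro l _; rfl
  | cons w cs ih =>
    intro l h
    simp only [List.foldl_cons]
    have hw : w.toList ≠ [] :=
      fun he => h w List.mem_cons_self (String.toList_eq_nil_iff.mp he)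
    have hhead : censureLoopA w.toList (l.length + 1) l
        = if PySem.Chars.isIn w.toList l then
            l.foldl (censureStepB (w.toList.length : Int) w.toList) []
          else l := by
      by_cases hin : PySem.Chars.isIn w.toList l = true
      · rw [if_pos hin, loopA_eq_foldB w.toList hw _ l (by omega)]
      · simp only [censureLoopA, hin, Bool.false_eq_true, if_false]
    rw [hhead]
    exact ih _ (fun x hx => h x (List.mem_cons_of_mem w hx))

-- ===== VERDICT (by name: the statement is the Claim_ definition above) =====
theorem censure_spec : Claim_equal_censure := by
  intro text cs _ hpre
  unfold Spec_censure censure censure_alt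
  rw [outer_fold_eq cs text.toList (fun w hw he => hpre (he ▸ hw))]
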